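-- pv_equiv track=rewrite | github.com/Geo-omics/scripts | lib/omics/bins2fasta.py | get_fa_sequences
-- ===== SOURCE A (Python) =====
-- def get_fa_sequences(file, contigs):
--     """
--     Generate fasta sequences from a fasta formatted file
--
--     :param file:  File-like object, fasta-formatted text
--     :param contig: Collection of names of contigs that should be yielded
--     """
--     name = None
--     seq = None
--     for line in file:
--         if line.startswith('>'):
--             if seq is not None:
--                 yield name, seq
--
--             # start new sequence
--             # sequence/contig name is text between > and first whitespace
--             name = line.split()[0][1:]
--             if name in contigs:
--                 seq = line
--             else:
--                 # skip this sequence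
--                 name = None
--                 seq = None
--         else:
--             if seq is not None:
--                 seq += line
--
--     # last sequence or empty file
--     if seq is not None:
--         yield name, seq
-- ===== SOURCE B (Python) =====
-- from itertools import groupby
--
--
-- def get_fa_sequences(file, contigs):
--     """
--     Generate fasta sequences from a fasta formatted file
--
--     :param file:  File-like object, fasta-formatted text
--     :param contig: Collection of names of contigs that should be yielded
--     """
--     wanted = set(contigs)
--     groups = [(key, list(grp))
--               for key, grp in groupby(file, key=lambda l: l.startswith('>'))]
--     if groups and not groups[0][0]:
--         # sequence lines before any header are skipped
--         groups = groups[1:]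
--     i = 0
--     while i < len(groups):
--         headers = groups[i][1]
--         body = groups[i + 1][1] if i + 1 < len(groups) else []
--         for h in headers[:-1]:
--             # bare header: the next line is another header, so no body
--             name = h.split()[0][1:]
--             if name in wanted:
--                 yield name, h
--         name = headers[-1].split()[0][1:]
--         if name in wanted:
--             yield name, headers[-1] + ''.join(body)
--         i += 2
-- ===== Notes on version B (the rewrite author's own statement) =====
-- stated objective: alternative
-- what changed: B replaces A's per-line name/seq state machine with an itertools.groupby decomposition: the stream is cut once into alternating header/sequence blocks, a leading sequence block is dropped, and each header group is paired with the body block that follows it (bare headers get an empty body).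
import Mathlib
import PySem

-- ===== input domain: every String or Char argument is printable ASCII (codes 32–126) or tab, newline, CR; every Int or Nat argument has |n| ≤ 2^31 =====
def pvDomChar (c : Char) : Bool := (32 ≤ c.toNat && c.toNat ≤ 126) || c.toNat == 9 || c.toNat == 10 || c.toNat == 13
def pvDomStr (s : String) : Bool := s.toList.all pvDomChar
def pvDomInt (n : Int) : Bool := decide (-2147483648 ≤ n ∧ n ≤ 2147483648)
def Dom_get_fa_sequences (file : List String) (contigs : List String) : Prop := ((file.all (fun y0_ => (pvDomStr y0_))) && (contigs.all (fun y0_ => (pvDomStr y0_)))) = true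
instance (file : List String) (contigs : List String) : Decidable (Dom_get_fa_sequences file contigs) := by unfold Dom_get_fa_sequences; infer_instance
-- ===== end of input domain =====

-- B re-groups the line stream with groupby into header/body blocks instead of A's
-- per-line state machine (objective: alternative decomposition, same cost).
-- Both A and B are Python generators; the ports collect the yielded pairs in order.

-- ===== PORT A =====

-- line.split()[0][1:] — guarded in both Pythons: line starts with '>', so split() is nonempty
def pvName (line : String) : String :=
  PySem.Str.slice ((PySem.Str.split₀ line).headD "") (some 1) none

-- the for-loop of A, over state (name, seq); yields are emitted in order
def pvGoA (contigs : List String) (name seq : Option String) : List String → List (String × String)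
  | [] =>
    -- last sequence or empty file
    (match name, seq with
     | nm, some s => [(nm.getD "", s)]
     | _, none => [])
  | line :: rest =>
    if PySem.Str.startswith line ">" then
      (match name, seq with
       | nm, some s => [(nm.getD "", s)]
       | _, none => []) ++
      (let nm := pvName line
       if contigs.contains nm then pvGoA contigs (some nm) (some line) rest
       else pvGoA contigs none none rest)
    else
      match seq with
      | some s => pvGoA contigs name (some (s ++ line)) rest
      | none => pvGoA contigs name none rest

def get_fa_sequences (file : List String) (contigs : List String) : List (String × String) :=
  pvGoA contigs none none file

-- ===== PORT B =====

def pvIsHdr (l : String) : Bool := PySem.Str.startswith l ">"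

-- itertools.groupby(file, key=lambda l: l.startswith('>')), each group materialised
def pvGroupby : List String → List (Bool × List String)
  | [] => []
  | l :: ls =>
    (pvIsHdr l, l :: ls.takeWhile (fun x => pvIsHdr x == pvIsHdr l)) ::
      pvGroupby (ls.dropWhile (fun x => pvIsHdr x == pvIsHdr l))
termination_by l => l.length
decreasing_by
  simp only [List.length_cons]
  exact Nat.lt_succ_of_le (List.length_dropWhile_le _ _)

-- one header group and the body group that follows it (body = [] if none)
def pvEmit (wanted : PySem.Set String) (headers body : List String) : List (String × String) :=
  (headers.dropLast.filterMap (fun h =>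
     if PySem.Set.contains wanted (pvName h) then some (pvName h, h) else none)) ++
  (match headers.getLast? with  -- headers is nonempty for every groupby group
   | some last =>
     if PySem.Set.contains wanted (pvName last) then
       [(pvName last, last ++ PySem.Str.join "" body)]
     else []
   | none => [])

-- the while-loop of B: consume a header group and its trailing body group per step
def pvWalk (wanted : PySem.Set String) : List (Bool × List String) → List (String × String)
  | [] => []
  | (_, headers) :: rest =>
    match rest with
    | (_, body) :: rest' => pvEmit wanted headers body ++ pvWalk wanted rest'
    | [] => pvEmit wanted headers []

def get_fa_sequences_alt (file : List String) (contigs : List String) : List (String × String) :=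
  let wanted := PySem.Set.ofList contigs
  match pvGroupby file with
  | (false, _) :: rest => pvWalk wanted rest  -- sequence lines before any header are skipped
  | groups => pvWalk wanted groups

-- ===== PRECONDITION & SPEC =====
def Spec_get_fa_sequences (file : List String) (contigs : List String) (out : List (String × String)) : Prop := out = get_fa_sequences_alt file contigs
instance (file : List String) (contigs : List String) (out : List (String × String)) : Decidable (Spec_get_fa_sequences file contigs out) := by unfold Spec_get_fa_sequences; infer_instance

-- ===== CLAIM (what is proved, stated in full; the proofs are below) =====
def Claim_equal_get_fa_sequences : Prop := ∀ (file : List String) (contigs : List String), Dom_get_fa_sequences file contigs → Spec_get_fa_sequences file contigs (get_fa_sequences file contigs)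

-- ===== LEMMAS AND PROOFS =====

-- proof-side view of get_fa_sequences_alt's match
def pvSkip : List (Bool × List String) → List (Bool × List String)
  | (false, _) :: rest => rest
  | gs => gs

theorem pvAlt_eq (file contigs : List String) :
    get_fa_sequences_alt file contigs =
      pvWalk (PySem.Set.ofList contigs) (pvSkip (pvGroupby file)) := by
  unfold get_fa_sequences_alt pvSkip
  rcases pvGroupby file with _ | ⟨⟨k, g⟩, rest⟩
  · rfl
  · cases k <;> rfl

theorem pvContains_ofList (c : List String) (x : String) :
    PySem.Set.contains (PySem.Set.ofList c) x = c.contains x := by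
  simp [PySem.Set.contains]

theorem pvJoin_nil : PySem.Str.join "" [] = "" := by
  simp [PySem.Str.join]

theorem pvJoin_cons (x : String) (xs : List String) :
    PySem.Str.join "" (x :: xs) = x ++ PySem.Str.join "" xs := by
  apply String.toList_inj.mp
  simp [PySem.Str.join, PySem.Chars.join]
  cases xs <;> simp [List.intercalate]

-- A skips non-header lines while no sequence is active
theorem pvSkipBody (c : List String) (b : List String) (rest : List String)
    (hb : ∀ x ∈ b, pvIsHdr x = false) :
    pvGoA c none none (b ++ rest) = pvGoA c none none rest := by
  induction b with
  | nil => rfl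
  | cons x xs ih =>
    have hx : pvIsHdr x = false := hb x (by simp)
    simp only [List.cons_append, pvGoA]
    rw [show PySem.Str.startswith x ">" = false from hx]
    simp only [Bool.false_eq_true, if_false]
    exact ih (fun y hy => hb y (by simp [hy]))

-- A appends non-header lines to the active sequence
theorem pvBody (c : List String) (b : List String) (rest : List String) (nm s : String)
    (hb : ∀ x ∈ b, pvIsHdr x = false) :
    pvGoA c (some nm) (some s) (b ++ rest) =
      pvGoA c (some nm) (some (s ++ PySem.Str.join "" b)) rest := by
  induction b generalizing s with
  | nil => simp [pvJoin_nil]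
  | cons x xs ih =>
    have hx : pvIsHdr x = false := hb x (by simp)
    simp only [List.cons_append, pvGoA]
    rw [show PySem.Str.startswith x ">" = false from hx]
    simp only [Bool.false_eq_true, if_false]
    rw [ih (s ++ x) (fun y hy => hb y (by simp [hy])), pvJoin_cons]
    congr 2
    apply String.toList_inj.mp; simp
-- (note: the final rewrite uses associativity of string append via toList)

-- an active sequence is flushed at end of file or at the next header
theorem pvFlush (c : List String) (rest : List String) (nm s : String)
    (h : rest = [] ∨ ∃ hd tl, rest = hd :: tl ∧ pvIsHdr hd = true) :
    pvGoA c (some nm) (some s) rest = (nm, s) :: pvGoA c none none rest := by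
  rcases h with h | ⟨hd, tl, rfl, hh⟩
  · subst h; rfl
  · simp only [pvGoA]
    rw [show PySem.Str.startswith hd ">" = true from hh]
    simp

-- a run of consecutive header lines
theorem pvHdrRun (c : List String) (t : List String) (h : String) (rest : List String)
    (hh : ∀ x ∈ h :: t, pvIsHdr x = true) :
    pvGoA c none none ((h :: t) ++ rest) =
      ((h :: t).dropLast.filterMap (fun x =>
        if c.contains (pvName x) then some (pvName x, x) else none)) ++
      (let last := (h :: t).getLast (by simp)
       if c.contains (pvName last) then
         pvGoA c (some (pvName last)) (some last) rest
       else pvGoA c none none rest) := by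
  induction t generalizing h with
  | nil =>
    simp only [List.cons_append, List.nil_append, pvGoA]
    rw [show PySem.Str.startswith h ">" = true from hh h (by simp)]
    simp
  | cons h2 t2 ih =>
    have hh1 : pvIsHdr h = true := hh h (by simp)
    have hh2 : pvIsHdr h2 = true := hh h2 (by simp)
    have step : pvGoA c none none ((h :: h2 :: t2) ++ rest) =
        (if c.contains (pvName h) then [(pvName h, h)] else []) ++
          pvGoA c none none ((h2 :: t2) ++ rest) := by
      -- the next line h2 is a header: any active (pvName h, h) is flushed there
      simp only [List.cons_append, pvGoA,
        show PySem.Str.startswith h ">" = true from hh1,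
        show PySem.Str.startswith h2 ">" = true from hh2, if_true]
      by_cases hc : pvName h ∈ c <;> simp [hc]
    rw [step, ih h2 (fun y hy => hh y (List.mem_cons_of_mem _ hy))]
    simp only [List.dropLast_cons_of_ne_nil (by simp : h2 :: t2 ≠ []),
      List.filterMap_cons, List.getLast_cons (by simp : h2 :: t2 ≠ [])]
    by_cases hc : pvName h ∈ c <;> simp [hc]

theorem pvStr_append_empty (s : String) : s ++ "" = s := by
  apply String.toList_inj.mp; simp

-- the head of the block dropWhile leaves behind fails the block's key
theorem pvDropWhileHead (p : String → Bool) (l : List String) (x : String) (xs : List String)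
    (h : l.dropWhile p = x :: xs) : p x = false := by
  have := List.head?_dropWhile_not p l
  rw [h] at this
  simpa using this

theorem pvTakeWhileKey (k : Bool) (ls : List String) (x : String)
    (hx : x ∈ ls.takeWhile (fun y => pvIsHdr y == k)) : pvIsHdr x = k := by
  have := List.mem_takeWhile_imp hx
  simpa using this

theorem pvMainAux (n : ℕ) (file c : List String) (hn : file.length ≤ n) :
    pvGoA c none none file = pvWalk (PySem.Set.ofList c) (pvSkip (pvGroupby file)) := by
  induction n generalizing file with
  | zero =>
    have : file = [] := List.eq_nil_of_length_eq_zero (Nat.le_zero.mp hn)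
    subst this
    rw [pvGroupby]
    rfl
  | succ n ih =>
    match file with
    | [] => rw [pvGroupby]; rfl
    | l :: ls =>
      have hsplit : ls.takeWhile (fun y => pvIsHdr y == pvIsHdr l) ++
          ls.dropWhile (fun y => pvIsHdr y == pvIsHdr l) = ls :=
        List.takeWhile_append_dropWhile
      set tw := ls.takeWhile (fun y => pvIsHdr y == pvIsHdr l) with htw
      set rest := ls.dropWhile (fun y => pvIsHdr y == pvIsHdr l) with hrest
      have hlen : rest.length ≤ n := by
        have h1 : rest.length ≤ ls.length := List.length_dropWhile_le _ _
        simp only [List.length_cons] at hn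
        omega
      have hgrp : pvGroupby (l :: ls) = (pvIsHdr l, l :: tw) :: pvGroupby rest := by
        rw [pvGroupby]
      by_cases hk : pvIsHdr l = true
      · -- header block: pvHdrRun on l :: tw, then the body block (if any) via pvBody/pvFlush
        have hhs : ∀ x ∈ l :: tw, pvIsHdr x = true := by
          intro x hx
          rcases List.mem_cons.mp hx with rfl | hx
          · exact hk
          · rw [pvTakeWhileKey (pvIsHdr l) ls x hx, hk]
        have hA : pvGoA c none none (l :: ls) =
            ((l :: tw).dropLast.filterMap (fun x =>
              if c.contains (pvName x) then some (pvName x, x) else none)) ++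
            (let last := (l :: tw).getLast (by simp)
             if c.contains (pvName last) then
               pvGoA c (some (pvName last)) (some last) rest
             else pvGoA c none none rest) := by
          conv_lhs => rw [show l :: ls = (l :: tw) ++ rest by simp [hsplit]]
          exact pvHdrRun c tw l rest hhs
        rw [hgrp, hk, hA]
        have hskip : pvSkip ((true, l :: tw) :: pvGroupby rest) =
            (true, l :: tw) :: pvGroupby rest := rfl
        rw [hskip]
        have hlast : (l :: tw).getLast? = some ((l :: tw).getLast (by simp)) := by
          rw [List.getLast?_eq_some_getLast]
        match hr : rest with
        | [] =>
          rw [pvGroupby]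
          simp only [pvWalk, pvEmit, pvContains_ofList, hlast, pvJoin_nil,
            pvStr_append_empty]
          by_cases hc : pvName ((l :: tw).getLast (by simp)) ∈ c <;>
            simp [hc, pvGoA]
        | r :: rs =>
          have hrh : pvIsHdr r = false := by
            have := pvDropWhileHead _ ls r rs hrest.symm
            simp [hk] at this
            simp [this]
          have hsplit2 : rs.takeWhile (fun y => pvIsHdr y == pvIsHdr r) ++
              rs.dropWhile (fun y => pvIsHdr y == pvIsHdr r) = rs :=
            List.takeWhile_append_dropWhile
          set tw2 := rs.takeWhile (fun y => pvIsHdr y == pvIsHdr r) with htw2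
          set rest2 := rs.dropWhile (fun y => pvIsHdr y == pvIsHdr r) with hrest2
          have hb : ∀ x ∈ r :: tw2, pvIsHdr x = false := by
            intro x hx
            rcases List.mem_cons.mp hx with rfl | hx
            · exact hrh
            · rw [pvTakeWhileKey (pvIsHdr r) rs x hx, hrh]
          have hgrp2 : pvGroupby (r :: rs) = (pvIsHdr r, r :: tw2) :: pvGroupby rest2 := by
            rw [pvGroupby]
          have hlen2 : rest2.length ≤ n := by
            have h1 : rest2.length ≤ rs.length := List.length_dropWhile_le _ _
            simp only [List.length_cons] at hlen
            omega
          -- rest2 is empty or starts with a header, so pvSkip is the identity on its groups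
          have hskip2 : pvSkip (pvGroupby rest2) = pvGroupby rest2 := by
            match h2 : rest2 with
            | [] => rw [pvGroupby]; rfl
            | x :: xs =>
              have hxh : pvIsHdr x = true := by
                have := pvDropWhileHead _ rs x xs hrest2.symm
                simp [hrh] at this
                simp [this]
              rw [pvGroupby, hxh]
              rfl
          have htail : pvGoA c none none rest2 =
              pvWalk (PySem.Set.ofList c) (pvGroupby rest2) := by
            rw [ih rest2 hlen2, hskip2]
          have hflush : rest2 = [] ∨ ∃ hd tl, rest2 = hd :: tl ∧ pvIsHdr hd = true := by
            match h2 : rest2 with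
            | [] => exact Or.inl rfl
            | x :: xs =>
              refine Or.inr ⟨x, xs, rfl, ?_⟩
              have := pvDropWhileHead _ rs x xs hrest2.symm
              simp [hrh] at this
              simp [this]
          rw [hgrp2, hrh]
          simp only [pvWalk, pvEmit, pvContains_ofList, hlast]
          rw [← htail]
          have hbr : r :: rs = (r :: tw2) ++ rest2 := by simp [hsplit2]
          by_cases hc : pvName ((l :: tw).getLast (by simp)) ∈ c
          · simp only [List.contains_eq_mem, hc, decide_true, if_true]
            rw [hbr, pvBody c (r :: tw2) rest2 _ _ hb,
              pvFlush c rest2 _ _ hflush]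
            simp
          · simp only [List.contains_eq_mem, hc, decide_false, Bool.false_eq_true, if_false]
            rw [hbr, pvSkipBody c (r :: tw2) rest2 hb]
            simp
      · -- leading non-header block: A skips it, B drops the first group
        have hk' : pvIsHdr l = false := by simpa using hk
        have hb : ∀ x ∈ l :: tw, pvIsHdr x = false := by
          intro x hx
          rcases List.mem_cons.mp hx with rfl | hx
          · exact hk'
          · rw [pvTakeWhileKey (pvIsHdr l) ls x hx, hk']
        have hA : pvGoA c none none (l :: ls) = pvGoA c none none rest := by
          conv_lhs => rw [show l :: ls = (l :: tw) ++ rest by simp [hsplit]]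
          exact pvSkipBody c (l :: tw) rest hb
        rw [hgrp, hk', hA]
        have hskip : pvSkip ((false, l :: tw) :: pvGroupby rest) = pvGroupby rest := rfl
        rw [hskip]
        have hskip2 : pvSkip (pvGroupby rest) = pvGroupby rest := by
          match h2 : rest with
          | [] => rw [pvGroupby]; rfl
          | x :: xs =>
            have hxh : pvIsHdr x = true := by
              have := pvDropWhileHead _ ls x xs hrest.symm
              simp [hk'] at this
              simp [this]
            rw [pvGroupby, hxh]
            rfl
        rw [ih rest hlen, hskip2]

-- ===== VERDICT (by name: the statement is the Claim_ definition above) =====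
theorem get_fa_sequences_spec : Claim_equal_get_fa_sequences := by
  intro file contigs _
  unfold Spec_get_fa_sequences get_fa_sequences
  rw [pvAlt_eq]
  exact pvMainAux file.length file contigs le_rfl
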